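-- pv_equiv track=rewrite | github.com/smithi35/Basic-Cryptography | Combined.py | a1z26
-- ===== SOURCE A (Python) =====
-- def a1z26(contents) :
-- 	alphabet = ['A', 'B', 'C', 'D', 'E', 'F', 'G', 'H', 'I', 'J', 'K', 'L', 'M', 'N', 'O', 'P', 'Q', 'R', 'S', 'T', 'U', 'V', 'W', 'X', 'Y', 'Z']
-- 	output = ""
-- 	letter = ""
-- 	for char in contents:
-- 		# first get the letter
--
-- 		if isNumber(char) :
-- 			letter = letter + char
-- 		else :
-- 			if letter is not "" :
-- 				output = output + a1z26_cypher(letter, alphabet)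
-- 			if not isDash(char) :
-- 				output = output + char
--
-- 			letter = ""
--
-- 	if letter is not "" :
-- 		output = output + a1z26_cypher(letter, alphabet)
--
-- 	return output
--
-- def isDash(char) :
-- 	ascii = ord(char)
-- 	isD = False
--
-- 	if ascii is 45:
-- 		isD = True;
--
-- 	return isD
--
-- def isNumber(char) :
-- 	ascii = ord(char)
-- 	isN = False
--
-- 	if ascii > 47 and ascii < 58 :
-- 		isN = True
--
-- 	return isN
--
-- def a1z26_cypher(letter, alphabet) :
-- 	number = int(letter)
-- 	number = number - 1
-- 	actual = alphabet[number]
--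
-- 	return actual
-- ===== SOURCE B (Python) =====
-- def a1z26(contents):
--     alphabet = ['A', 'B', 'C', 'D', 'E', 'F', 'G', 'H', 'I', 'J', 'K', 'L', 'M',
--                 'N', 'O', 'P', 'Q', 'R', 'S', 'T', 'U', 'V', 'W', 'X', 'Y', 'Z']
--     out = []
--     i = 0
--     n = len(contents)
--     while i < n:
--         c = contents[i]
--         if '0' <= c <= '9':
--             j = i
--             while j < n and '0' <= contents[j] <= '9':
--                 j += 1
--             out.append(alphabet[int(contents[i:j]) - 1])
--             i = j
--         else:
--             if c != '-':
--                 out.append(c)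
--             i += 1
--     return ''.join(out)
-- ===== Notes on version B (the rewrite author's own statement) =====
-- stated objective: alternative
-- what changed: B replaces A's char-by-char accumulator with flush logic by an index/run scanner: it finds each maximal digit run with an inner scan, converts the whole slice at once, appends pieces to a list and joins once at the end.
-- outside the precondition, e.g. on a1z26('27'): A raises IndexError, B raises IndexError
import Mathlib
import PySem

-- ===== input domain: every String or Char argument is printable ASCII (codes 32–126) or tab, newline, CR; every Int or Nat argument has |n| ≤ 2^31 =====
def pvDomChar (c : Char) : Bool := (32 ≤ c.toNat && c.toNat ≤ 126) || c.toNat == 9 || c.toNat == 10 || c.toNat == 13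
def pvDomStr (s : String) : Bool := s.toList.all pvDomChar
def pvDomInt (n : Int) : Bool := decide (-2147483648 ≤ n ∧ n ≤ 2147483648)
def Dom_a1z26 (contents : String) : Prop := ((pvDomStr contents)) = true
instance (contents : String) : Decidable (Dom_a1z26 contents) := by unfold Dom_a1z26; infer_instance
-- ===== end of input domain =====

-- B replaces A's char-by-char accumulator-and-flush loop by a run scanner that converts each
-- maximal digit run at once and joins the pieces at the end (objective: alternative structure).

-- ===== PORT A =====
def pvAlphabet : List Char :=
  ['A', 'B', 'C', 'D', 'E', 'F', 'G', 'H', 'I', 'J', 'K', 'L', 'M',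
   'N', 'O', 'P', 'Q', 'R', 'S', 'T', 'U', 'V', 'W', 'X', 'Y', 'Z']

def pvIsNumber (c : Char) : Bool := decide (47 < c.toNat) && decide (c.toNat < 58)

def pvIsDash (c : Char) : Bool := c.toNat == 45

-- a1z26_cypher: alphabet[int(letter) - 1]; on out-of-range Python raises IndexError
-- (those inputs are outside Pre_a1z26), here '?' stands in for the missing value.
def pvCypherA (letter : List Char) : List Char :=
  match PySem.List.pyGet? pvAlphabet ((PySem.Int.ofChars? letter).getD 0 - 1) with
  | some a => [a]
  | none => ['?']

def pvStepA (st : List Char × List Char) (c : Char) : List Char × List Char :=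
  if pvIsNumber c then (st.1, st.2 ++ [c])
  else
    let out1 := if st.2 ≠ [] then st.1 ++ pvCypherA st.2 else st.1
    let out2 := if ¬ pvIsDash c then out1 ++ [c] else out1
    (out2, [])

def a1z26 (contents : String) : String :=
  String.mk (if (contents.toList.foldl pvStepA ([], [])).2 ≠ [] then
      (contents.toList.foldl pvStepA ([], [])).1 ++ pvCypherA (contents.toList.foldl pvStepA ([], [])).2
    else (contents.toList.foldl pvStepA ([], [])).1)

-- ===== PORT B =====
def pvDigit (c : Char) : Bool := decide ('0' ≤ c) && decide (c ≤ '9')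

-- alphabet[int(run) - 1]; '?' stands in for Python's IndexError, outside Pre_a1z26.
def pvLetterOf (run : List Char) : List Char :=
  match PySem.List.pyGet? pvAlphabet ((PySem.Int.ofChars? run).getD 0 - 1) with
  | some a => [a]
  | none => ['?']

-- the outer while-loop of B: inner scan = takeWhile/dropWhile on the rest of the input
def pvScan : List Char → List Char
  | [] => []
  | c :: rest =>
    if pvDigit c then
      pvLetterOf (c :: rest.takeWhile pvDigit) ++ pvScan (rest.dropWhile pvDigit)
    else if c ≠ '-' then c :: pvScan rest
    else pvScan rest
termination_by l => l.length
decreasing_by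
  · exact Nat.lt_succ_of_le (List.length_dropWhile_le _ _)
  · simp
  · simp

def a1z26_alt (contents : String) : String := String.mk (pvScan contents.toList)

-- ===== PRECONDITION & SPEC =====
-- Pre_ excludes exactly the inputs where Python A raises IndexError: a maximal digit run
-- whose integer value exceeds 26 (e.g. "27" or "123").  Splitting the characters at the
-- non-digit characters yields exactly the maximal digit runs (plus empty chunks, whose
-- getD-value is 0).
def Pre_a1z26 (contents : String) : Prop :=
  ∀ r ∈ contents.toList.splitOnP (fun c => !pvDigit c), (PySem.Int.ofChars? r).getD 0 ≤ 26
instance (contents : String) : Decidable (Pre_a1z26 contents) := by unfold Pre_a1z26; infer_instance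

def pvWitness_a1z26 : String := "8-5-12-12-15 23-15-18-12-4"

def Spec_a1z26 (contents : String) (out : String) : Prop := out = a1z26_alt contents
instance (contents : String) (out : String) : Decidable (Spec_a1z26 contents out) := by unfold Spec_a1z26; infer_instance

-- ===== CLAIM (what is proved, stated in full; the proofs are below) =====
def Claim_equal_a1z26 : Prop := ∀ (contents : String), Dom_a1z26 contents → Pre_a1z26 contents → Spec_a1z26 contents (a1z26 contents)

-- ===== LEMMAS AND PROOFS =====
lemma pvIsNumber_eq_pvDigit (c : Char) : pvIsNumber c = pvDigit c := by
  have h0 : ('0').val.toNat = 48 := rfl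
  have h9 : ('9').val.toNat = 57 := rfl
  have hc : c.toNat = c.val.toNat := rfl
  unfold pvIsNumber pvDigit
  congr 1 <;> refine decide_eq_decide.mpr ?_ <;>
    rw [Char.le_def, UInt32.le_iff_toNat_le] <;> simp only [h9, hc] <;> omega

lemma pvIsDash_eq (c : Char) : pvIsDash c = (c == '-') := by
  unfold pvIsDash
  rw [Bool.beq_eq_decide_eq, Bool.beq_eq_decide_eq]
  refine decide_eq_decide.mpr ?_
  constructor
  · intro h; exact Char.ext (by rw [← UInt32.toNat_inj]; exact h)
  · rintro rfl; rfl

lemma pvCypherA_eq (l : List Char) : pvCypherA l = pvLetterOf l := rfl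

lemma takeWhile_digits_append (ds : List Char) (h : ds.all pvDigit = true)
    (c : Char) (hc : pvDigit c = false) (l : List Char) :
    (ds ++ c :: l).takeWhile pvDigit = ds ∧ (ds ++ c :: l).dropWhile pvDigit = c :: l := by
  induction ds with
  | nil => simp [hc]
  | cons d ds ih =>
    simp only [List.all_cons, Bool.and_eq_true] at h
    have := ih h.2
    simp [h.1, this.1, this.2]

lemma scan_digits_append (letter : List Char) (h : letter.all pvDigit = true)
    (c : Char) (hc : pvDigit c = false) (l : List Char) :
    pvScan (letter ++ c :: l) =
      (if letter = [] then [] else pvLetterOf letter) ++ pvScan (c :: l) := by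
  cases letter with
  | nil => simp
  | cons d ds =>
    simp only [List.all_cons, Bool.and_eq_true] at h
    obtain ⟨h1, h2⟩ := takeWhile_digits_append ds h.2 c hc l
    simp [pvScan, h.1, h1, h2]

lemma scan_all_digits (letter : List Char) (h : letter.all pvDigit = true) :
    pvScan letter = if letter = [] then [] else pvLetterOf letter := by
  cases letter with
  | nil => simp [pvScan]
  | cons d ds =>
    simp only [List.all_cons, Bool.and_eq_true] at h
    simp [pvScan, h.1, List.takeWhile_eq_self_iff.mpr (by simpa using h.2),
      List.dropWhile_eq_nil_iff.mpr (by simpa using h.2)]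

lemma foldA_main : ∀ (l out letter : List Char), letter.all pvDigit = true →
    (if (l.foldl pvStepA (out, letter)).2 ≠ [] then
        (l.foldl pvStepA (out, letter)).1 ++ pvCypherA (l.foldl pvStepA (out, letter)).2
      else (l.foldl pvStepA (out, letter)).1)
      = out ++ pvScan (letter ++ l) := by
  intro l
  induction l with
  | nil =>
    intro out letter h
    simp only [List.foldl_nil, List.append_nil, scan_all_digits letter h, pvCypherA_eq]
    by_cases hl : letter = [] <;> simp [hl]
  | cons c l ih =>
    intro out letter h
    rw [List.foldl_cons]
    by_cases hd : pvDigit c = true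
    · have hstep : pvStepA (out, letter) c = (out, letter ++ [c]) := by
        simp [pvStepA, pvIsNumber_eq_pvDigit, hd]
      rw [hstep, ih out (letter ++ [c]) (by simp_all), List.append_assoc]
      simp
    · have hdc : pvDigit c = false := by simpa using hd
      have hstep : pvStepA (out, letter) c =
          ((if letter ≠ [] then out ++ pvCypherA letter else out) ++
            (if ¬ (c == '-') = true then [c] else []), []) := by
        simp only [pvStepA, pvIsNumber_eq_pvDigit, hdc, pvIsDash_eq]
        split <;> split <;> simp_all
      rw [hstep, ih _ [] (by simp), List.nil_append,
        scan_digits_append letter h c hdc l]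
      have hscan : pvScan (c :: l) = (if ¬ (c == '-') = true then [c] else []) ++ pvScan l := by
        rw [pvScan]
        simp only [hdc]
        by_cases hdash : c = '-' <;> simp [hdash]
      rw [hscan]
      by_cases hl : letter = [] <;> simp [hl, List.append_assoc, pvCypherA_eq]

-- ===== VERDICT (by name: the statement is the Claim_ definition above) =====
theorem a1z26_spec : Claim_equal_a1z26 := by
  intro contents _ _
  unfold Spec_a1z26 a1z26 a1z26_alt
  rw [foldA_main contents.toList [] [] (by simp)]
  simp
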